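-- pv_equiv track=rewrite | github.com/noosdev0/KLinterSel | KLinterSel_v0.3Win.py | _kway_intersection_size
-- ===== SOURCE A (Python) =====
-- def _kway_intersection_size(window_sets) -> int:
--     """
--     Exact k-way intersection size among sets in window_sets.
--     """
--     if not window_sets:
--         return 0
--     inter = window_sets[0].copy()
--     for s in window_sets[1:]:
--         inter.intersection_update(s)
--         if not inter:
--             return 0
--     return len(inter)
-- ===== SOURCE B (Python) =====
-- def _kway_intersection_size(window_sets) -> int:
--     """
--     Exact k-way intersection size among sets in window_sets,
--     computed with a one-shot frequency table instead of progressive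
--     intersection: an element lies in the intersection iff it occurs
--     in all k sets.
--     """
--     if not window_sets:
--         return 0
--     k = len(window_sets)
--     counts = {}
--     for s in window_sets:
--         for x in s:
--             counts[x] = counts.get(x, 0) + 1
--     return sum(1 for c in counts.values() if c == k)
-- ===== Notes on version B (the rewrite author's own statement) =====
-- stated objective: alternative
-- what changed: Replaces progressive intersection_update with early exit by a single frequency-table pass over all sets: count each element once per set and return the number of keys whose count equals len(window_sets).
import Mathlib
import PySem

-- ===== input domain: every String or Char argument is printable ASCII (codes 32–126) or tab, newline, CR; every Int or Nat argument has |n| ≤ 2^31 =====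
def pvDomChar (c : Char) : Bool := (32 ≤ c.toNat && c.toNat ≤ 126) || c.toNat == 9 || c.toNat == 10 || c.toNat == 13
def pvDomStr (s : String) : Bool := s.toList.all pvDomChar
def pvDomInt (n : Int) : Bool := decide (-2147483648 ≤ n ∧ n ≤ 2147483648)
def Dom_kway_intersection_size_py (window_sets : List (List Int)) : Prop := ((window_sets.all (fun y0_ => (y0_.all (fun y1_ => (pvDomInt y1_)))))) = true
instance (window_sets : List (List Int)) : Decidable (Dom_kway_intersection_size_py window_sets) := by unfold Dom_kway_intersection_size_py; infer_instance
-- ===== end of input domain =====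

-- B replaces A's progressive intersection_update loop (with early exit) by a single
-- frequency-table pass: count each element once per set, then count the keys whose
-- tally equals the number of sets.  Same asymptotic cost; different algorithm.
-- Each inner `List Int` encodes a Python set: its DISTINCT elements (PySem.Set.ofList
-- is applied where the Python value is the marshalled set).

-- ===== PORT A =====
-- the `for s in window_sets[1:]` loop: inter.intersection_update(s); early return on empty
def pvAloopA (rest : List (List Int)) (inter : PySem.Set Int) : Int :=
  match rest with
  | [] => PySem.Set.len inter
  | s :: t =>
    let inter' := PySem.Set.inter inter (PySem.Set.ofList s)
    if inter' = [] then 0 else pvAloopA t inter'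

def kway_intersection_size_py (window_sets : List (List Int)) : Int :=
  match window_sets with
  | [] => 0                                   -- if not window_sets: return 0
  | s0 :: rest => pvAloopA rest (PySem.Set.ofList s0)   -- inter = window_sets[0].copy()

-- ===== PORT B =====
def kway_intersection_size_py_alt (window_sets : List (List Int)) : Int :=
  if window_sets = [] then 0
  else
    -- k = len(window_sets); counts built by: for s in window_sets: for x in s: counts[x] = counts.get(x, 0) + 1
    (((window_sets.foldl
        (fun d s => (PySem.Set.ofList s).foldl (fun d x => d.insert x (d.getD x 0 + 1)) d)
        PySem.Dict.empty).values.countP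
        (fun c => c == (window_sets.length : Int)) : Nat) : Int)  -- sum(1 for c in counts.values() if c == k)

-- ===== PRECONDITION & SPEC =====
def Spec_kway_intersection_size_py (window_sets : List (List Int)) (out : Int) : Prop := out = kway_intersection_size_py_alt window_sets
instance (window_sets : List (List Int)) (out : Int) : Decidable (Spec_kway_intersection_size_py window_sets out) := by unfold Spec_kway_intersection_size_py; infer_instance

-- ===== CLAIM (what is proved, stated in full; the proofs are below) =====
def Claim_equal_kway_intersection_size_py : Prop := ∀ (window_sets : List (List Int)), Dom_kway_intersection_size_py window_sets → Spec_kway_intersection_size_py window_sets (kway_intersection_size_py window_sets)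

-- ===== LEMMAS AND PROOFS =====

-- A's loop computes the size of the filter of `inter` by membership in every remaining set.
theorem pvAloopA_eq (rest : List (List Int)) (inter : PySem.Set Int) :
    pvAloopA rest inter
      = ((inter.filter (fun x => rest.all (fun s => decide (x ∈ s)))).length : Int) := by
  induction rest generalizing inter with
  | nil => simp [pvAloopA, PySem.Set.len]
  | cons s t ih =>
    have hinter : PySem.Set.inter inter (PySem.Set.ofList s)
        = inter.filter (fun x => decide (x ∈ s)) := by
      simp [PySem.Set.inter, PySem.Set.mem_ofList]
    by_cases h : PySem.Set.inter inter (PySem.Set.ofList s) = []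
    · have hnil : inter.filter (fun x => (s :: t).all (fun s' => decide (x ∈ s'))) = [] := by
        rw [List.filter_eq_nil_iff]
        intro x hx hall
        have hxs : x ∈ s := by
          simp [List.all_cons] at hall; exact hall.1
        have : x ∈ PySem.Set.inter inter (PySem.Set.ofList s) := by
          rw [hinter, List.mem_filter]; exact ⟨hx, by simpa using hxs⟩
        simp [h] at this
      rw [pvAloopA, if_pos h, hnil]
      simp
    · rw [pvAloopA, if_neg h, ih, hinter, List.filter_filter]
      congr 2
      exact List.filter_congr (fun x _ => by simp [List.all_cons, Bool.and_comm])

-- the tally of x after B's double fold = number of sets of ws containing x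
theorem pvCountsGetD (ws : List (List Int)) (d : PySem.Dict Int Int) (x : Int) :
    (ws.foldl (fun d s => (PySem.Set.ofList s).foldl (fun d x => d.insert x (d.getD x 0 + 1)) d) d).getD x 0
      = d.getD x 0 + (ws.countP (fun s => decide (x ∈ s)) : Nat) := by
  induction ws generalizing d with
  | nil => simp
  | cons s t ih =>
    rw [List.foldl_cons, ih, PySem.Dict.getD_foldl_insert_add_one]
    have hc : (PySem.Set.ofList s).count x = (if x ∈ s then 1 else 0) := by
      by_cases hx : x ∈ s
      · rw [if_pos hx]
        exact List.count_eq_one_of_mem (PySem.Set.nodup_ofList s) ((PySem.Set.mem_ofList s x).mpr hx)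
      · rw [if_neg hx, List.count_eq_zero]
        simpa [PySem.Set.mem_ofList] using hx
    rw [List.countP_cons, hc]
    by_cases hx : x ∈ s <;> simp [hx]
    ring

-- membership in the key list of B's table
theorem pvCountsKeysMem (ws : List (List Int)) (d : PySem.Dict Int Int) (x : Int) :
    x ∈ (ws.foldl (fun d s => (PySem.Set.ofList s).foldl (fun d x => d.insert x (d.getD x 0 + 1)) d) d).keys
      ↔ x ∈ d.keys ∨ ∃ s ∈ ws, x ∈ s := by
  induction ws generalizing d with
  | nil => simp
  | cons s t ih =>
    rw [List.foldl_cons, ih, PySem.Dict.keys_foldl_insert, PySem.Set.mem_update,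
      PySem.Set.mem_ofList]
    constructor
    · rintro (⟨h | h⟩ | ⟨s', hs', hx⟩)
      · exact Or.inl h
      · exact Or.inr ⟨s, List.mem_cons_self, h⟩
      · exact Or.inr ⟨s', List.mem_cons_of_mem _ hs', hx⟩
    · rintro (h | ⟨s', hs', hx⟩)
      · exact Or.inl (Or.inl h)
      · rcases List.mem_cons.mp hs' with rfl | hs'
        · exact Or.inl (Or.inr hx)
        · exact Or.inr ⟨s', hs', hx⟩

-- the key list of B's table has no duplicates
theorem pvCountsKeysNodup (ws : List (List Int)) (d : PySem.Dict Int Int)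
    (hd : d.keys.Nodup) :
    (ws.foldl (fun d s => (PySem.Set.ofList s).foldl (fun d x => d.insert x (d.getD x 0 + 1)) d) d).keys.Nodup := by
  induction ws generalizing d with
  | nil => exact hd
  | cons s t ih =>
    exact ih _ (PySem.Dict.nodup_keys_foldl_insert _ _ _ hd)

-- ===== VERDICT (by name: the statement is the Claim_ definition above) =====
theorem kway_intersection_size_py_spec : Claim_equal_kway_intersection_size_py := by
  intro ws _
  unfold Spec_kway_intersection_size_py
  match ws with
  | [] => rfl
  | s0 :: rest =>
    rw [kway_intersection_size_py, kway_intersection_size_py_alt,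
      if_neg (List.cons_ne_nil s0 rest), pvAloopA_eq]
    set F : PySem.Dict Int Int :=
      (s0 :: rest).foldl
        (fun d s => (PySem.Set.ofList s).foldl (fun d x => d.insert x (d.getD x 0 + 1)) d)
        PySem.Dict.empty with hF
    have hknd : F.keys.Nodup := pvCountsKeysNodup (s0 :: rest) _ (by simp)
    have hkeymem : ∀ x : Int, x ∈ F.keys ↔ ∃ s ∈ s0 :: rest, x ∈ s := by
      intro x; rw [hF, pvCountsKeysMem]; simp
    have hgetD : ∀ x : Int, F.getD x 0 = ((s0 :: rest).countP (fun s => decide (x ∈ s)) : Nat) := by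
      intro x; rw [hF, pvCountsGetD]; simp
    rw [PySem.Dict.values_eq_map_keys F hknd 0, List.countP_map]
    -- on keys, "tally == k" is exactly "x belongs to every set of window_sets"
    have hcongr : F.keys.countP
          ((fun c => c == (((s0 :: rest).length : Nat) : Int)) ∘ fun x => F.getD x 0)
        = F.keys.countP (fun x => (s0 :: rest).all (fun s => decide (x ∈ s))) := by
      apply List.countP_congr
      intro x _
      simp only [Function.comp, hgetD x, beq_iff_eq, List.all_eq_true, decide_eq_true_eq]
      constructor
      · intro h s hs
        have hlen : (s0 :: rest).countP (fun s => decide (x ∈ s)) = (s0 :: rest).length := by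
          exact_mod_cast h
        simpa using (List.countP_eq_length).mp hlen s hs
      · intro h
        have hlen : (s0 :: rest).countP (fun s => decide (x ∈ s)) = (s0 :: rest).length :=
          (List.countP_eq_length).mpr (by intro s hs; simpa using h s hs)
        exact_mod_cast hlen
    rw [hcongr, List.countP_eq_length_filter]
    -- the two filtered nodup lists have the same members, hence equal length
    have h1 : ((PySem.Set.ofList s0).filter (fun x => rest.all (fun s => decide (x ∈ s)))).Nodup :=
      (PySem.Set.nodup_ofList s0).filter _
    have h2 : (F.keys.filter (fun x => (s0 :: rest).all (fun s => decide (x ∈ s)))).Nodup :=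
      hknd.filter _
    have hperm : ((PySem.Set.ofList s0).filter (fun x => rest.all (fun s => decide (x ∈ s)))).Perm
        (F.keys.filter (fun x => (s0 :: rest).all (fun s => decide (x ∈ s)))) := by
      apply List.perm_of_nodup_nodup_toFinset_eq h1 h2
      ext x
      simp only [List.mem_toFinset, List.mem_filter, PySem.Set.mem_ofList, hkeymem,
        List.all_eq_true, decide_eq_true_eq]
      constructor
      · rintro ⟨hx0, hall⟩
        refine ⟨⟨s0, List.mem_cons_self, hx0⟩, ?_⟩
        intro s hs
        rcases List.mem_cons.mp hs with rfl | hs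
        · exact hx0
        · exact hall s hs
      · rintro ⟨_, hall⟩
        exact ⟨hall s0 List.mem_cons_self, fun s hs => hall s (List.mem_cons_of_mem _ hs)⟩
    rw [hperm.length_eq]
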